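-- pv_equiv track=rewrite | github.com/pypi-data/pypi-mirror-404 | packages/copyparty/copyparty-1.20.6.tar.gz/copyparty-1.20.6/copyparty/util.py | align_tab
-- ===== SOURCE A (Python) =====
-- def align_tab(lines )  :
--     rows = []
--     ncols = 0
--     for ln in lines:
--         row = [x for x in ln.split(" ") if x]
--         ncols = max(ncols, len(row))
--         rows.append(row)
--
--     lens = [0] * ncols
--     for row in rows:
--         for n, col in enumerate(row):
--             lens[n] = max(lens[n], len(col))
--
--     return ["".join(x.ljust(y + 2) for x, y in zip(row, lens)) for row in rows]
-- ===== SOURCE B (Python) =====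
-- def align_tab(lines):
--     rows = [[x for x in ln.split(" ") if x] for ln in lines]
--     outs = [""] * len(rows)
--     for k in reversed(range(max(map(len, rows), default=0))):
--         w = max(len(r[k]) for r in rows if k < len(r)) + 2
--         outs = [(r[k].ljust(w) + t if k < len(r) else t) for r, t in zip(rows, outs)]
--     return outs
-- ===== Notes on version B (the rewrite author's own statement) =====
-- stated objective: alternative
-- what changed: A runs two phases (scatter-max updates into a mutable per-column width table, then a row-major ljust-join per row); B instead sweeps the columns once from last to first, computing each column's width on the fly and prepending the padded cell onto each row's growing suffix string, with no width table and no join step.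
import Mathlib
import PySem

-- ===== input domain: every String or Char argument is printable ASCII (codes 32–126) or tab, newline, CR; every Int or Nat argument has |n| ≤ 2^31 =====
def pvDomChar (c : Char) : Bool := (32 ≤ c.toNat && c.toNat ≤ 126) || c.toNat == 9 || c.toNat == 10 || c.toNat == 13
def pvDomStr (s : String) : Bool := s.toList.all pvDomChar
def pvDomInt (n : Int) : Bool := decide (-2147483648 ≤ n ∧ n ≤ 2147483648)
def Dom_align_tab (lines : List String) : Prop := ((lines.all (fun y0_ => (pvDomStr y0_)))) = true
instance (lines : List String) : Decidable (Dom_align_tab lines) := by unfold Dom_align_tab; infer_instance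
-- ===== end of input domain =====

-- B replaces A's two phases (a mutable per-column width table, then a row-major join)
-- by a single backwards column-major sweep that prepends each padded cell onto the
-- rows' growing suffix strings (objective: alternative; return value proved equal).

-- shared helpers = the Python builtins both versions call:
-- [x for x in ln.split(" ") if x]
def splitRow (ln : String) : List (List Char) :=
  (PySem.Chars.splitOn ln.toList [' ']).filter (fun x => x ≠ [])

-- x.ljust(w): pad on the right with spaces to width w (no-op if already wider)
def pyLjust (cs : List Char) (w : Nat) : List Char :=
  cs ++ List.replicate (w - cs.length) ' '

-- ===== PORT A =====
def align_tab (lines : List String) : List String :=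
  let acc := lines.foldl
    (fun (acc : List (List (List Char)) × Nat) ln =>
      let row := splitRow ln
      (acc.1 ++ [row], max acc.2 row.length)) ([], 0)
  let rows := acc.1
  let lens := rows.foldl
    (fun lens row =>
      (PySem.List.enumerate row 0).foldl
        (fun lens p =>
          PySem.List.pySetD lens p.1 (max (PySem.List.pyGetD lens p.1 0) p.2.length))
        lens)
    (List.replicate acc.2 0)
  rows.map (fun row =>
    String.ofList (((row.zip lens).map (fun p => pyLjust p.1 (p.2 + 2))).flatten))

-- ===== PORT B =====
def align_tab_alt (lines : List String) : List String :=
  let rows := lines.map splitRow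
  let outs := ((List.range ((rows.map List.length).foldl max 0)).reverse).foldl
    (fun (outs : List (List Char)) k =>
      -- Python: w = max(len(r[k]) for r in rows if k < len(r)) + 2; the generator is
      -- nonempty for every k < max row length, so folding Nat max from 0 is exact here
      let w := ((rows.filterMap (fun r => r[k]?)).map List.length).foldl max 0 + 2
      (rows.zip outs).map (fun p =>
        match p.1[k]? with
        | some c => pyLjust c w ++ p.2
        | none => p.2))
    (List.replicate rows.length [])
  outs.map String.ofList

-- ===== PRECONDITION & SPEC =====
def Spec_align_tab (lines : List String) (out : List String) : Prop := out = align_tab_alt lines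
instance (lines : List String) (out : List String) : Decidable (Spec_align_tab lines out) := by unfold Spec_align_tab; infer_instance

-- ===== CLAIM (what is proved, stated in full; the proofs are below) =====
def Claim_equal_align_tab : Prop := ∀ (lines : List String), Dom_align_tab lines → Spec_align_tab lines (align_tab lines)

-- ===== LEMMAS AND PROOFS =====

-- the column-wise maximum both versions' widths amount to
def colmax (rows : List (List (List Char))) (n : Nat) : Nat :=
  rows.foldl (fun a r => max a (r.getD n []).length) 0

-- the tail of an output row from cell m on, padded by widths f
def rowTail (f : Nat → Nat) : List (List Char) → Nat → List Char
  | [], _ => []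
  | c :: rs, m => pyLjust c (f m + 2) ++ rowTail f rs (m + 1)

-- A's first loop = the row table plus the running max of row lengths
lemma foldA_eq (lines : List String) (R : List (List (List Char))) (m : Nat) :
    lines.foldl
      (fun (acc : List (List (List Char)) × Nat) ln =>
        let row := splitRow ln
        (acc.1 ++ [row], max acc.2 row.length)) (R, m)
    = (R ++ lines.map splitRow,
       (lines.map splitRow).foldl (fun a r => max a r.length) m) := by
  induction lines generalizing R m with
  | nil => simp
  | cons ln rest ih => simp [ih]

-- B's per-column width fold (over the rows that reach column n) = colmax with a seed
lemma colB_eq (rows : List (List (List Char))) (n : Nat) (a : Nat) :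
    ((rows.filterMap (fun r => r[n]?)).map List.length).foldl max a
    = rows.foldl (fun a r => max a (r.getD n []).length) a := by
  induction rows generalizing a with
  | nil => rfl
  | cons r rest ih =>
      cases h : r[n]? with
      | none =>
          have hn : r.length ≤ n := by
            by_contra hlt
            simp [List.getElem?_eq_getElem (by omega : n < r.length)] at h
          simp [h, ih, List.getD_eq_getElem?_getD]
      | some v =>
          have hv : r.getD n [] = v := by
            simp [List.getD_eq_getElem?_getD, h]
          simp [h, ih]

-- the inner enumerate loop of A, pointwise
lemma innerA_eq (row : List (List Char)) (s : Nat) (L : List Nat)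
    (h : s + row.length ≤ L.length) :
    let R := (PySem.List.enumerate row (s : Int)).foldl
      (fun lens p =>
        PySem.List.pySetD lens p.1 (max (PySem.List.pyGetD lens p.1 0) p.2.length)) L
    R.length = L.length ∧
      ∀ n : Nat, R.getD n 0 =
        if s ≤ n ∧ n < s + row.length
        then max (L.getD n 0) (row.getD (n - s) []).length
        else L.getD n 0 := by
  induction row generalizing s L with
  | nil =>
      refine ⟨by simp [PySem.List.enumerate_nil], ?_⟩
      intro n
      have : ¬ (s ≤ n ∧ n < s + 0) := by omega
      simp [PySem.List.enumerate_nil]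
  | cons x xs ih =>
      intro R
      have hs : s < L.length := by simp at h; omega
      have hcast : (s : Int) + 1 = ((s + 1 : Nat) : Int) := by push_cast; ring
      set L' := PySem.List.pySetD L (s : Int) (max (PySem.List.pyGetD L (s : Int) 0) x.length) with hL'
      have hL'len : L'.length = L.length := PySem.List.length_pySetD _ _ _
      have hL'get : ∀ n : Nat, L'.getD n 0 =
          if n = s then max (L.getD s 0) x.length else L.getD n 0 := by
        intro n
        simp only [hL', PySem.List.pySetD_natCast, PySem.List.pyGetD_natCast,
          List.getD_eq_getElem?_getD, List.getElem?_set]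
        by_cases hns : n = s
        · subst hns; simp [hs]
        · simp [Ne.symm hns, hns]
      have h' : (s + 1) + xs.length ≤ L'.length := by simp [hL'len] at *; omega
      have hmain := ih (s + 1) L' h'
      have hRdef : R = (PySem.List.enumerate xs ((s + 1 : Nat) : Int)).foldl
          (fun lens p =>
            PySem.List.pySetD lens p.1 (max (PySem.List.pyGetD lens p.1 0) p.2.length)) L' := by
        simp only [R, PySem.List.enumerate_cons, List.foldl_cons, hL', hcast]
      refine ⟨by rw [hRdef]; exact hmain.1.trans hL'len, ?_⟩
      intro n
      rw [hRdef]
      rw [hmain.2 n]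
      by_cases hc1 : s + 1 ≤ n ∧ n < s + 1 + xs.length
      · rw [if_pos hc1]
        have hxx : s ≤ n ∧ n < s + (x :: xs).length :=
          ⟨by omega, by simp only [List.length_cons]; omega⟩
        rw [if_pos hxx, hL'get n, if_neg (by omega : ¬ n = s)]
        have h2 : n - s = (n - s - 1) + 1 := by omega
        have h1 : n - (s + 1) = n - s - 1 := by omega
        rw [h2, List.getD_cons_succ, h1]
      · rw [if_neg hc1]
        by_cases hns : n = s
        · rw [hL'get n, if_pos hns, hns,
            if_pos ⟨le_refl s, by simp only [List.length_cons]; omega⟩]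
          simp
        · rw [hL'get n, if_neg hns,
            if_neg (by simp only [List.length_cons] at hc1 ⊢; omega)]

-- A's outer lens loop, pointwise
lemma outerA_eq (rows : List (List (List Char))) (L : List Nat)
    (h : ∀ r ∈ rows, r.length ≤ L.length) :
    let R := rows.foldl
      (fun lens row =>
        (PySem.List.enumerate row 0).foldl
          (fun lens p =>
            PySem.List.pySetD lens p.1 (max (PySem.List.pyGetD lens p.1 0) p.2.length))
          lens) L
    R.length = L.length ∧
      ∀ n : Nat, R.getD n 0 =
        rows.foldl (fun a r => max a (r.getD n []).length) (L.getD n 0) := by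
  induction rows generalizing L with
  | nil => exact ⟨rfl, fun n => rfl⟩
  | cons row rest ih =>
      intro R
      have hrow : row.length ≤ L.length := h row (by simp)
      have hinner := innerA_eq row 0 L (by omega)
      set L' := (PySem.List.enumerate row ((0 : Nat) : Int)).foldl
        (fun lens p =>
          PySem.List.pySetD lens p.1 (max (PySem.List.pyGetD lens p.1 0) p.2.length)) L with hL'
      have hrest := ih L' (fun r hr => (hinner.1).symm ▸ h r (by simp [hr]))
      have hRdef : R = rest.foldl
          (fun lens row =>
            (PySem.List.enumerate row 0).foldl
              (fun lens p =>
                PySem.List.pySetD lens p.1 (max (PySem.List.pyGetD lens p.1 0) p.2.length))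
              lens) L' := by
        simp only [R, List.foldl_cons, hL', Nat.cast_zero]
      refine ⟨by rw [hRdef]; exact hrest.1.trans hinner.1, ?_⟩
      intro n
      rw [hRdef, hrest.2 n, List.foldl_cons]
      congr 1
      rw [hinner.2 n]
      by_cases hn : n < row.length
      · rw [if_pos ⟨Nat.zero_le n, by omega⟩, Nat.sub_zero]
      · rw [if_neg (by omega),
          List.getD_eq_default _ _ (by omega : row.length ≤ n)]
        simp

-- A's row output (zip with the lens table) as rowTail
lemma zip_eq_rowTail (r : List (List Char)) (L : List Nat) (f : Nat → Nat) (m : Nat)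
    (hlen : r.length ≤ L.length) (hf : ∀ k, k < L.length → L.getD k 0 = f (m + k)) :
    ((r.zip L).map (fun p => pyLjust p.1 (p.2 + 2))).flatten = rowTail f r m := by
  induction r generalizing L m with
  | nil => simp [rowTail]
  | cons c rs ih =>
      cases L with
      | nil => simp at hlen
      | cons l L' =>
          have h0 : l = f m := by simpa using hf 0 (by simp)
          have hf' : ∀ k, k < L'.length → L'.getD k 0 = f ((m + 1) + k) := by
            intro k hk
            have := hf (k + 1) (by simp; omega)
            simpa [Nat.add_assoc, Nat.add_comm 1 k] using this
          simp only [List.zip_cons_cons, List.map_cons, List.flatten_cons, rowTail, h0]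
          rw [ih L' (m + 1) (by simp at hlen ⊢; omega) hf']

-- zipping a list with a map of itself
lemma zip_map_self {α β γ : Type} (xs : List α) (g : α → β) (h : α × β → γ) :
    (xs.zip (xs.map g)).map h = xs.map (fun x => h (x, g x)) := by
  induction xs with
  | nil => rfl
  | cons x rest ih => simp [ih]

-- B's backwards sweep: after the columns m-1 … 0, each row carries its whole output
lemma foldB (rows : List (List (List Char))) (f : Nat → Nat)
    (hw : ∀ k, ((rows.filterMap (fun r => r[k]?)).map List.length).foldl max 0 = f k) :
    ∀ (m : Nat) (S : List (List Char)),
      S = rows.map (fun r => rowTail f (r.drop m) m) →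
      ((List.range m).reverse).foldl
        (fun (outs : List (List Char)) k =>
          let w := ((rows.filterMap (fun r => r[k]?)).map List.length).foldl max 0 + 2
          (rows.zip outs).map (fun p =>
            match p.1[k]? with
            | some c => pyLjust c w ++ p.2
            | none => p.2)) S
      = rows.map (fun r => rowTail f r 0) := by
  intro m
  induction m with
  | zero => intro S hS; simpa using hS
  | succ m ih =>
      intro S hS
      rw [List.range_succ, List.reverse_append, List.reverse_singleton,
        List.singleton_append, List.foldl_cons]
      apply ih
      rw [hS, hw, zip_map_self]
      apply List.map_congr_left
      intro r _
      cases hk : r[m]? with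
      | some c =>
          obtain ⟨hm, hc⟩ := List.getElem?_eq_some_iff.mp hk
          have hdrop : r.drop m = c :: r.drop (m + 1) := by
            rw [List.drop_eq_getElem_cons hm, hc]
          simp [hdrop, rowTail]
      | none =>
          have hm : r.length ≤ m := List.getElem?_eq_none_iff.mp hk
          simp [List.drop_eq_nil_of_le hm, List.drop_eq_nil_of_le (by omega : r.length ≤ m + 1),
            rowTail]

theorem align_tab_eq_alt (lines : List String) : align_tab lines = align_tab_alt lines := by
  unfold align_tab align_tab_alt
  simp only [foldA_eq, List.nil_append]
  set rows := lines.map splitRow with hrows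
  have hncols : (lines.map splitRow).foldl (fun a r => max a r.length) 0
      = (rows.map List.length).foldl max 0 := by
    rw [hrows, List.foldl_map, List.foldl_map, List.foldl_map]
  rw [hncols]
  set ncols := (rows.map List.length).foldl max 0 with hncols'
  have hbound : ∀ r ∈ rows, r.length ≤ ncols := by
    intro r hr
    have := (PySem.List.le_foldl_max_nat (rows.map List.length) (fun x => x) 0).2
    have hmem : r.length ∈ rows.map List.length := List.mem_map_of_mem hr
    simpa [hncols', List.foldl_map] using this _ hmem
  have hboundL : ∀ r ∈ rows, r.length ≤ (List.replicate ncols (0:Nat)).length := by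
    intro r hr; rw [List.length_replicate]; exact hbound r hr
  have houter := outerA_eq rows (List.replicate ncols 0) hboundL
  set lensA := rows.foldl
      (fun lens row =>
        (PySem.List.enumerate row 0).foldl
          (fun lens p =>
            PySem.List.pySetD lens p.1 (max (PySem.List.pyGetD lens p.1 0) p.2.length))
          lens) (List.replicate ncols 0) with hlensA
  have hlen : lensA.length = ncols := by simpa using houter.1
  have hpoint : ∀ n : Nat, lensA.getD n 0 = colmax rows n := by
    intro n
    rw [houter.2 n]
    have : (List.replicate ncols (0:Nat)).getD n 0 = 0 := by
      simp [List.getD_eq_getElem?_getD, List.getElem?_replicate]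
      split_ifs <;> rfl
    rw [this]; rfl
  -- A side: every row's output is rowTail (colmax rows)
  have hA : ∀ r ∈ rows,
      ((r.zip lensA).map (fun p => pyLjust p.1 (p.2 + 2))).flatten
      = rowTail (colmax rows) r 0 := by
    intro r hr
    exact zip_eq_rowTail r lensA (colmax rows) 0 (hlen ▸ hbound r hr)
      (fun k _ => by rw [hpoint k, Nat.zero_add])
  -- B side: the backwards sweep produces the same rowTails
  have hB := foldB rows (colmax rows)
    (fun k => colB_eq rows k 0) ncols (List.replicate rows.length [])
    (by
      symm
      rw [List.eq_replicate_iff]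
      refine ⟨by simp, ?_⟩
      intro b hb
      simp only [List.mem_map] at hb
      obtain ⟨r, hr, hbr⟩ := hb
      rw [List.drop_eq_nil_of_le (hbound r hr)] at hbr
      simpa [rowTail] using hbr.symm)
  rw [hB]
  simp only [List.map_map]
  exact List.map_congr_left (fun r hr => by simp [Function.comp, hA r hr])

-- ===== VERDICT (by name: the statement is the Claim_ definition above) =====
theorem align_tab_spec : Claim_equal_align_tab := by
  intro lines _
  unfold Spec_align_tab
  exact align_tab_eq_alt lines
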